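-- pv_equiv track=rewrite | github.com/kostapao/mialoo_streamlit | T1016_Streamlit.py | multi_line
-- ===== SOURCE A (Python) =====
-- def multi_line(label):
--     """" Display text on multiple lines if longer than 2 words, newline on every second word"""
--     counter = 1
--     new_string = ""
--     words = label.split()
--     for i in words:
--         if counter % 2 == 1:
--             i = i + " "
--             new_string += i
--         else:
--             i = i + "\n"
--             new_string += i
--         counter+=1
--
--     if new_string[-4:] == "\n":
--         new_string = new_string[:-4]
--     else:
--         new_string = new_string[:-1]
--     return(new_string)
-- ===== SOURCE B (Python) =====
-- def multi_line(label):
--     words = label.split()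
--     lines = [" ".join(words[i:i+2]) for i in range(0, len(words), 2)]
--     return "\n".join(lines)
-- ===== Notes on version B (the rewrite author's own statement) =====
-- stated objective: simpler
-- what changed: Replaces A's counter-driven accumulator loop with alternating separators plus a trailing-character trim by grouping the split words into consecutive pairs and nesting two joins (space within a pair, newline between pairs).
import Mathlib
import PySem

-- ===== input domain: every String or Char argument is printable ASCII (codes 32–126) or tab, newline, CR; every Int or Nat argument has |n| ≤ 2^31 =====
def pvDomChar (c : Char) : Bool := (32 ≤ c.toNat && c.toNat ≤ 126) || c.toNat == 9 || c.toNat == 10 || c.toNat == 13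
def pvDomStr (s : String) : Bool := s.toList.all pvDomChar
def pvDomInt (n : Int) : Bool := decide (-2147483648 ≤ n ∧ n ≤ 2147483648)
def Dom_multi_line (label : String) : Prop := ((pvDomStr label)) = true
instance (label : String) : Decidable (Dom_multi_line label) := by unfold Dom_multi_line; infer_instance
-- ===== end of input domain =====

-- B replaces A's counter-driven accumulator loop and trailing-character trim by pairing the words
-- two at a time and nesting joins ("simpler"); return values agree on all inputs (A is total).

-- ===== PORT A =====
-- A's loop: state (counter, new_string); words appended with " " on odd counter, "\n" on even;
-- then the (dead) new_string[-4:] == "\n" branch and the new_string[:-1] trim, as written.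
def multi_line (label : String) : String :=
  let words := PySem.Str.split₀ label
  let res := words.foldl
    (fun (st : Int × List Char) w =>
      if PySem.Int.mod st.1 2 == 1 then (st.1 + 1, st.2 ++ (w.toList ++ [' ']))
      else (st.1 + 1, st.2 ++ (w.toList ++ ['\n']))) (1, [])
  let ns := res.2
  if PySem.List.slice ns (some (-4)) none = ['\n'] then
    String.ofList (PySem.List.slice ns none (some (-4)))
  else
    String.ofList (PySem.List.slice ns none (some (-1)))

-- ===== PORT B =====
def multi_line_alt (label : String) : String :=
  let words := PySem.Str.split₀ label
  let lines := (PySem.List.pyRange 0 (PySem.List.len words) 2).map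
    (fun i => PySem.Str.join " " (PySem.List.slice words (some i) (some (i + 2))))
  PySem.Str.join "\n" lines

-- ===== PRECONDITION & SPEC =====
def Spec_multi_line (label : String) (out : String) : Prop := out = multi_line_alt label
instance (label : String) (out : String) : Decidable (Spec_multi_line label out) := by unfold Spec_multi_line; infer_instance

-- ===== CLAIM (what is proved, stated in full; the proofs are below) =====
def Claim_equal_multi_line : Prop := ∀ (label : String), Dom_multi_line label → Spec_multi_line label (multi_line label)

-- ===== LEMMAS AND PROOFS =====

-- A's accumulated string, with the parity of the counter made explicit.
def pvRaw (odd : Bool) : List String → List Char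
  | [] => []
  | w :: ws => w.toList ++ (if odd then ' ' else '\n') :: pvRaw (!odd) ws

-- B's pairs of consecutive words.
def pvChunks : List String → List (List String)
  | [] => []
  | w :: ws => (w :: ws.take 1) :: pvChunks (ws.drop 1)
termination_by ws => ws.length
decreasing_by simp

theorem pvMod_step (c : Int) :
    (PySem.Int.mod (c + 1) 2 == 1) = !(PySem.Int.mod c 2 == 1) := by
  rw [PySem.Int.mod_eq_emod_of_pos (by norm_num), PySem.Int.mod_eq_emod_of_pos (by norm_num)]
  rcases Int.emod_two_eq c with h | h <;>
    simp [Int.add_emod, h]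

theorem pvFold_eq_raw (ws : List String) : ∀ (c : Int) (s : List Char),
    (ws.foldl
      (fun (st : Int × List Char) w =>
        if PySem.Int.mod st.1 2 == 1 then (st.1 + 1, st.2 ++ (w.toList ++ [' ']))
        else (st.1 + 1, st.2 ++ (w.toList ++ ['\n']))) (c, s)).2
    = s ++ pvRaw (PySem.Int.mod c 2 == 1) ws := by
  induction ws with
  | nil => intro c s; simp [pvRaw]
  | cons w ws ih =>
    intro c s
    rw [List.foldl_cons, pvRaw]
    change (List.foldl _
      (if PySem.Int.mod c 2 == 1 then (c + 1, s ++ (w.toList ++ [' ']))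
       else (c + 1, s ++ (w.toList ++ ['\n']))) ws).2 = _
    cases hb : (PySem.Int.mod c 2 == 1) with
    | true =>
      simp only [reduceIte]
      rw [ih, pvMod_step, hb]
      simp
    | false =>
      rw [if_neg (by simp), ih, pvMod_step, hb]
      simp

theorem pvRaw_ne_nil (odd : Bool) (w : String) (ws : List String) :
    pvRaw odd (w :: ws) ≠ [] := by
  simp [pvRaw]

theorem pvSlice_ne (ws : List String) :
    PySem.List.slice (pvRaw true ws) (some (-4)) none ≠ ['\n'] := by
  cases ws with
  | nil => simp [pvRaw, PySem.List.slice]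
  | cons w ws =>
    intro h
    rw [show ((-4 : Int) = -((4 : Nat) : Int)) by norm_num,
      PySem.List.slice_from_neg_natCast _ 4 (by norm_num)] at h
    have hlen := congrArg List.length h
    simp [List.length_drop] at hlen
    have hlen1 : (pvRaw true (w :: ws)).length = 1 := by omega
    have h0 : List.drop ((pvRaw true (w :: ws)).length - 4) (pvRaw true (w :: ws))
        = pvRaw true (w :: ws) := by
      rw [hlen1]; simp
    rw [h0] at h
    -- pvRaw true (w :: ws) = w.toList ++ ' ' :: …, which cannot equal ['\n']
    rw [pvRaw] at h
    cases hw : w.toList with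
    | nil => rw [hw] at h; simp at h
    | cons c cs =>
      rw [hw] at h
      have := congrArg List.length h
      simp at this

theorem pvRaw_dropLast (ws : List String) :
    (pvRaw true ws).dropLast
    = PySem.Chars.join ['\n']
        ((pvChunks ws).map (fun c => PySem.Chars.join [' '] (c.map String.toList))) := by
  match ws with
  | [] => simp [pvRaw, pvChunks, PySem.Chars.join_nil]
  | [w] =>
    simp [pvRaw, pvChunks, PySem.Chars.join_singleton]
  | w1 :: w2 :: rest =>
    have hch : pvChunks (w1 :: w2 :: rest) = [w1, w2] :: pvChunks rest := by
      rw [pvChunks]; rfl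
    cases rest with
    | nil =>
      have hdl : ∀ (l : List Char), (' ' :: (l ++ ['\n'])).dropLast = ' ' :: l := by
        intro l; rw [← List.cons_append, List.dropLast_concat]
      simp [pvRaw, hch, pvChunks, PySem.Chars.join_singleton, PySem.Chars.join_cons_cons, hdl]
    | cons r rs =>
      have ih := pvRaw_dropLast (r :: rs)
      have hne := pvRaw_ne_nil true r rs
      have hraw : pvRaw true (w1 :: w2 :: r :: rs)
          = (w1.toList ++ [' '] ++ w2.toList ++ ['\n']) ++ pvRaw true (r :: rs) := by
        simp [pvRaw]
      have hchne : pvChunks (r :: rs) = (r :: rs.take 1) :: pvChunks (rs.drop 1) := by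
        rw [pvChunks]
      rw [hraw, List.dropLast_append_of_ne_nil hne, ih, hch, hchne]
      simp [PySem.Chars.join_cons_cons, PySem.Chars.join_singleton]
termination_by ws.length

theorem pvRange_chunks (ws : List String) :
    (List.range ((ws.length + 1) / 2)).map (fun k => (ws.drop (2 * k)).take 2)
    = pvChunks ws := by
  match ws with
  | [] => simp [pvChunks]
  | w :: ws =>
    have ih := pvRange_chunks (ws.drop 1)
    have hm : ((w :: ws).length + 1) / 2 = ((List.drop 1 ws).length + 1) / 2 + 1 := by
      rw [List.length_drop]; rw [List.length_cons]; omega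
    rw [hm, List.range_succ_eq_map, List.map_cons, List.map_map, pvChunks]
    congr 1
    rw [← ih]
    apply List.map_congr_left
    intro k _
    rw [Function.comp_apply, List.drop_drop,
      show 2 * Nat.succ k = (2 * k + 1) + 1 by omega,
      List.drop_succ_cons, Nat.add_comm 1 (2 * k)]
termination_by ws.length

theorem pvAlt_eq (label : String) :
    multi_line_alt label
    = PySem.Str.join "\n" ((pvChunks (PySem.Str.split₀ label)).map (fun c => PySem.Str.join " " c)) := by
  simp only [multi_line_alt]
  set ws := PySem.Str.split₀ label with hws
  refine congrArg _ ?_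
  rcases Nat.eq_zero_or_pos ws.length with h0 | hpos
  · rw [List.eq_nil_of_length_eq_zero h0]
    rw [PySem.List.pyRange_of_pos 0 _ (by norm_num)]
    simp [PySem.List.len, pvChunks]
  · have hlt : (0 : Int) < PySem.List.len ws := by
      simp [PySem.List.len_eq]; omega
    rw [PySem.List.pyRange_of_pos _ _ (by norm_num : (0 : Int) < 2), if_pos hlt]
    have hcount : (((PySem.List.len ws) - 0 + 2 - 1) / 2).toNat = (ws.length + 1) / 2 := by
      simp [PySem.List.len_eq]
      omega
    rw [hcount, List.map_map, ← pvRange_chunks ws, List.map_map]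
    apply List.map_congr_left
    intro k _
    simp only [Function.comp]
    congr 1
    rw [show ((0 : Int) + 2 * (k : Int)) = ((2 * k : Nat) : Int) by push_cast; ring,
      show ((2 * k : Nat) : Int) + 2 = (((2 * k + 2) : Nat) : Int) by push_cast; ring,
      PySem.List.slice_natCast]
    congr 1
    omega

-- ===== VERDICT (by name: the statement is the Claim_ definition above) =====
theorem multi_line_spec : Claim_equal_multi_line := by
  intro label _
  unfold Spec_multi_line
  unfold multi_line
  set ws := PySem.Str.split₀ label with hws
  rw [pvAlt_eq label, ← hws]
  simp only []
  rw [pvFold_eq_raw ws 1 []]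
  have hmod : (PySem.Int.mod 1 2 == 1) = true := by decide
  rw [hmod]
  simp only [List.nil_append]
  rw [if_neg (pvSlice_ne ws), PySem.List.slice_to_neg_one]
  apply String.toList_inj.mp
  rw [PySem.Str.toList_join, String.toList_ofList, pvRaw_dropLast ws, List.map_map]
  rw [show "\n".toList = ['\n'] from rfl]
  congr 1
  apply List.map_congr_left
  intro c _
  rw [Function.comp_apply, PySem.Str.toList_join,
    show " ".toList = [' '] from rfl]
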